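-- pv_equiv track=rewrite | github.com/CheapNightbot/yutify | app/common/helpers.py | _mask_with_original_length
-- ===== SOURCE A (Python) =====
-- def _mask_with_original_length(
--     text, mask, mask_special_char, half_index, mask_from_start
-- ):
--     result = []
--     mask_length = half_index  # Always mask half the length of the string
--     for i, char in enumerate(text):
--         if (
--             mask_from_start
--             and i < mask_length
--             and (mask_special_char or char.isalnum())
--         ) or (
--             not mask_from_start
--             and i >= len(text) - mask_length
--             and (mask_special_char or char.isalnum())
--         ):
--             result.append(mask)
--         else:
--             result.append(char)
--     return "".join(result)
-- ===== SOURCE B (Python) =====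
-- def _mask_with_original_length(
--     text, mask, mask_special_char, half_index, mask_from_start
-- ):
--     def masked(segment):
--         return "".join(
--             mask if (mask_special_char or c.isalnum()) else c for c in segment
--         )
--
--     n = len(text)
--     if mask_from_start:
--         k = max(0, min(n, half_index))
--         return masked(text[:k]) + text[k:]
--     else:
--         start = min(n, max(0, n - half_index))
--         return text[:start] + masked(text[start:])
-- ===== Notes on version B (the rewrite author's own statement) =====
-- stated objective: simpler
-- what changed: Replaces the single indexed loop with a compound positional test by splitting the string at the clamped boundary into the masked slice and the untouched remainder, masking only the slice.
import Mathlib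
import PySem

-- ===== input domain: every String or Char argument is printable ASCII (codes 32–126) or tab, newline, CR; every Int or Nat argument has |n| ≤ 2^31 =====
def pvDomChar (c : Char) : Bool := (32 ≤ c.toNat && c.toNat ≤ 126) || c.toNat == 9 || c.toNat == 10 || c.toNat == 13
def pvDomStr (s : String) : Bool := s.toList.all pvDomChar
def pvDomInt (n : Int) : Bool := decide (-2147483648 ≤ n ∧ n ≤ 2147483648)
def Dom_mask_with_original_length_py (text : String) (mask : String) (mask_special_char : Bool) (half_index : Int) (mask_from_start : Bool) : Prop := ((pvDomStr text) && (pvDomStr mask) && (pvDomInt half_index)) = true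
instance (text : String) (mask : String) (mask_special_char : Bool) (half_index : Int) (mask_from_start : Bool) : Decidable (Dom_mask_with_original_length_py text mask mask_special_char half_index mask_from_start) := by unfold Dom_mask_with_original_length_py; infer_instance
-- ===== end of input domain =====

-- B splits the text at the clamped boundary into the masked slice and the untouched
-- remainder instead of A's single indexed loop with a compound positional test (simpler).

-- ===== PORT A =====
def mask_with_original_length_py (text : String) (mask : String) (mask_special_char : Bool) (half_index : Int) (mask_from_start : Bool) : String :=
  let mask_length := half_index
  let result : List String := (PySem.List.enumerate text.toList 0).foldl
    (fun acc p =>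
      if (mask_from_start && decide (p.1 < mask_length)
            && (mask_special_char || PySem.Chars.isalnum p.2))
         || (!mask_from_start && decide ((text.toList.length : Int) - mask_length ≤ p.1)
            && (mask_special_char || PySem.Chars.isalnum p.2))
      then acc ++ [mask]
      else acc ++ [String.ofList [p.2]]) []
  PySem.Str.join "" result

-- ===== PORT B =====
-- "".join(mask if (mask_special_char or c.isalnum()) else c for c in segment)
def pvMaskSeg (mask : List Char) (mask_special_char : Bool) (seg : List Char) : List Char :=
  (seg.map (fun c => if mask_special_char || PySem.Chars.isalnum c then mask else [c])).flatten

def mask_with_original_length_py_alt (text : String) (mask : String) (mask_special_char : Bool) (half_index : Int) (mask_from_start : Bool) : String :=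
  let cs := text.toList
  let n : Int := cs.length
  if mask_from_start then
    let k := (max 0 (min n half_index)).toNat
    String.ofList (pvMaskSeg mask.toList mask_special_char (cs.take k) ++ cs.drop k)
  else
    let start := (min n (max 0 (n - half_index))).toNat
    String.ofList (cs.take start ++ pvMaskSeg mask.toList mask_special_char (cs.drop start))

-- ===== PRECONDITION & SPEC =====
def Spec_mask_with_original_length_py (text : String) (mask : String) (mask_special_char : Bool) (half_index : Int) (mask_from_start : Bool) (out : String) : Prop := out = mask_with_original_length_py_alt text mask mask_special_char half_index mask_from_start
instance (text : String) (mask : String) (mask_special_char : Bool) (half_index : Int) (mask_from_start : Bool) (out : String) : Decidable (Spec_mask_with_original_length_py text mask mask_special_char half_index mask_from_start out) := by unfold Spec_mask_with_original_length_py; infer_instance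

-- ===== CLAIM (what is proved, stated in full; the proofs are below) =====
def Claim_equal_mask_with_original_length_py : Prop := ∀ (text : String) (mask : String) (mask_special_char : Bool) (half_index : Int) (mask_from_start : Bool), Dom_mask_with_original_length_py text mask mask_special_char half_index mask_from_start → Spec_mask_with_original_length_py text mask mask_special_char half_index mask_from_start (mask_with_original_length_py text mask mask_special_char half_index mask_from_start)

-- ===== LEMMAS AND PROOFS =====

theorem pv_join_empty (ls : List (List Char)) : PySem.Chars.join [] ls = ls.flatten := by
  simp only [PySem.Chars.join, List.intercalate]
  induction ls with
  | nil => simp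
  | cons x xs ih => cases xs <;> simp_all [List.intersperse]

theorem pv_flatten_singletons (xs : List Char) : (xs.map (fun c => [c])).flatten = xs := by
  induction xs <;> simp_all

theorem pv_enum_map_congr {β : Type} (xs : List Char) (s : Int) (f : Int × Char → β) (g : Char → β)
    (H : ∀ (k : Nat), k < xs.length → f (s + (k : Int), xs.getD k ' ') = g (xs.getD k ' ')) :
    (PySem.List.enumerate xs s).map f = xs.map g := by
  have h1 : (PySem.List.enumerate xs s).map f = (PySem.List.enumerate xs s).map (fun p => g p.2) := by
    apply List.map_congr_left
    intro p hp
    obtain ⟨k, hk, rfl⟩ := (PySem.List.mem_enumerate_iff xs s p).1 hp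
    have h2 : xs.getD k ' ' = xs[k] := by
      simp [List.getD_eq_getElem?_getD, List.getElem?_eq_getElem hk]
    have := H k hk
    rwa [h2] at this
  rw [h1]
  calc (PySem.List.enumerate xs s).map (fun p => g p.2)
      = ((PySem.List.enumerate xs s).map (fun p => p.2)).map g := by rw [List.map_map]; rfl
    _ = xs.map g := by rw [PySem.List.map_snd_enumerate]

theorem mask_with_original_length_py_spec : Claim_equal_mask_with_original_length_py := by
  intro text mask msc hi mfs _
  unfold Spec_mask_with_original_length_py mask_with_original_length_py mask_with_original_length_py_alt
  dsimp only
  -- rewrite A's foldl into a map, then into a flattened char list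
  have hfold : ∀ (l : List (Int × Char)),
      l.foldl (fun acc p =>
        if (mfs && decide (p.1 < hi) && (msc || PySem.Chars.isalnum p.2))
           || (!mfs && decide ((text.toList.length : Int) - hi ≤ p.1)
              && (msc || PySem.Chars.isalnum p.2))
        then acc ++ [mask] else acc ++ [String.ofList [p.2]]) []
      = l.map (fun p =>
          if (mfs && decide (p.1 < hi) && (msc || PySem.Chars.isalnum p.2))
             || (!mfs && decide ((text.toList.length : Int) - hi ≤ p.1)
                && (msc || PySem.Chars.isalnum p.2))
          then mask else String.ofList [p.2]) := by
    intro l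
    calc l.foldl (fun acc p =>
          if (mfs && decide (p.1 < hi) && (msc || PySem.Chars.isalnum p.2))
             || (!mfs && decide ((text.toList.length : Int) - hi ≤ p.1)
                && (msc || PySem.Chars.isalnum p.2))
          then acc ++ [mask] else acc ++ [String.ofList [p.2]]) []
        = l.foldl (fun acc p => acc ++ [if (mfs && decide (p.1 < hi) && (msc || PySem.Chars.isalnum p.2))
             || (!mfs && decide ((text.toList.length : Int) - hi ≤ p.1)
                && (msc || PySem.Chars.isalnum p.2))
          then mask else String.ofList [p.2]]) [] := by
          congr 1; funext acc p; split_ifs <;> rfl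
      _ = [] ++ l.map (fun p => if (mfs && decide (p.1 < hi) && (msc || PySem.Chars.isalnum p.2))
             || (!mfs && decide ((text.toList.length : Int) - hi ≤ p.1)
                && (msc || PySem.Chars.isalnum p.2))
          then mask else String.ofList [p.2]) := PySem.List.foldl_append_singleton_eq_map _ l []
      _ = _ := List.nil_append _
  rw [hfold]
  -- name the per-position char-list function of A
  set h : Int × Char → List Char := fun p =>
    if (mfs && decide (p.1 < hi) && (msc || PySem.Chars.isalnum p.2))
       || (!mfs && decide ((text.toList.length : Int) - hi ≤ p.1)
          && (msc || PySem.Chars.isalnum p.2))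
    then mask.toList else [p.2] with hh
  have hmapToList : ∀ (l : List (Int × Char)),
      (l.map (fun p =>
          if (mfs && decide (p.1 < hi) && (msc || PySem.Chars.isalnum p.2))
             || (!mfs && decide ((text.toList.length : Int) - hi ≤ p.1)
                && (msc || PySem.Chars.isalnum p.2))
          then mask else String.ofList [p.2])).map String.toList = l.map h := by
    intro l
    rw [List.map_map]
    apply List.map_congr_left
    intro p _
    simp only [Function.comp, hh]
    split_ifs <;> simp
  -- "".join(parts) as a flattened char list
  have hjoin : ∀ parts : List String,
      PySem.Str.join "" parts = String.ofList ((parts.map String.toList).flatten) := by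
    intro parts
    have hj := PySem.Str.toList_join "" parts
    rw [show ("" : String).toList = [] by rfl, pv_join_empty] at hj
    rw [← hj, String.ofList_toList]
  rw [hjoin, hmapToList]
  cases mfs with
  | true =>
    rw [if_pos rfl]
    apply congrArg String.ofList
    have hk_le : (max 0 (min (text.toList.length : Int) hi)).toNat ≤ text.toList.length := by
      omega
    have hsplit : PySem.List.enumerate text.toList 0
        = PySem.List.enumerate (text.toList.take (max 0 (min (text.toList.length : Int) hi)).toNat) 0
          ++ PySem.List.enumerate (text.toList.drop (max 0 (min (text.toList.length : Int) hi)).toNat)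
               (0 + ((text.toList.take (max 0 (min (text.toList.length : Int) hi)).toNat).length : Int)) := by
      rw [← PySem.List.enumerate_append, List.take_append_drop]
    rw [hsplit, List.map_append, List.flatten_append]
    congr 1
    · -- masked prefix
      unfold pvMaskSeg
      apply congrArg List.flatten
      apply pv_enum_map_congr
      intro j hj
      rw [hh]
      have hd : decide ((0 : Int) + (j : Int) < hi) = true := by
        simp only [List.length_take] at hj
        exact decide_eq_true (by omega)
      simp only [hd, Bool.true_and, Bool.not_true, Bool.false_and, Bool.or_false]
    · -- untouched suffix
      have hlen : (text.toList.take (max 0 (min (text.toList.length : Int) hi)).toNat).length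
          = (max 0 (min (text.toList.length : Int) hi)).toNat := by
        simp [List.length_take, Nat.min_eq_left hk_le]
      rw [hlen]
      have := pv_enum_map_congr
        (text.toList.drop (max 0 (min (text.toList.length : Int) hi)).toNat)
        (0 + ((max 0 (min (text.toList.length : Int) hi)).toNat : Int)) h (fun c => [c]) ?_
      · rw [this, pv_flatten_singletons]
      · intro j hj
        rw [hh]
        have hd : decide ((0 : Int) + ((max 0 (min (text.toList.length : Int) hi)).toNat : Int) + (j : Int) < hi) = false := by
          simp only [List.length_drop] at hj
          exact decide_eq_false (by omega)
        simp only [hd, Bool.true_and, Bool.and_false, Bool.false_and, Bool.not_true, Bool.or_false]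
        rfl
  | false =>
    rw [if_neg Bool.false_ne_true]
    apply congrArg String.ofList
    have hst_le : (min (text.toList.length : Int) (max 0 ((text.toList.length : Int) - hi))).toNat ≤ text.toList.length := by
      omega
    have hsplit : PySem.List.enumerate text.toList 0
        = PySem.List.enumerate (text.toList.take (min (text.toList.length : Int) (max 0 ((text.toList.length : Int) - hi))).toNat) 0
          ++ PySem.List.enumerate (text.toList.drop (min (text.toList.length : Int) (max 0 ((text.toList.length : Int) - hi))).toNat)
               (0 + ((text.toList.take (min (text.toList.length : Int) (max 0 ((text.toList.length : Int) - hi))).toNat).length : Int)) := by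
      rw [← PySem.List.enumerate_append, List.take_append_drop]
    rw [hsplit, List.map_append, List.flatten_append]
    congr 1
    · -- untouched prefix
      have := pv_enum_map_congr
        (text.toList.take (min (text.toList.length : Int) (max 0 ((text.toList.length : Int) - hi))).toNat)
        0 h (fun c => [c]) ?_
      · rw [this, pv_flatten_singletons]
      · intro j hj
        rw [hh]
        have hd : decide ((text.toList.length : Int) - hi ≤ (0 : Int) + (j : Int)) = false := by
          simp only [List.length_take] at hj
          exact decide_eq_false (by omega)
        simp only [hd, Bool.true_and, Bool.and_false, Bool.false_and, Bool.not_false, Bool.or_false]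
        rfl
    · -- masked suffix
      have hlen : (text.toList.take (min (text.toList.length : Int) (max 0 ((text.toList.length : Int) - hi))).toNat).length
          = (min (text.toList.length : Int) (max 0 ((text.toList.length : Int) - hi))).toNat := by
        simp [List.length_take]
      rw [hlen]
      unfold pvMaskSeg
      apply congrArg List.flatten
      apply pv_enum_map_congr
      intro j hj
      rw [hh]
      have hd : decide ((text.toList.length : Int) - hi ≤ (0 : Int) + ((min (text.toList.length : Int) (max 0 ((text.toList.length : Int) - hi))).toNat : Int) + (j : Int)) = true := by
        simp only [List.length_drop] at hj
        exact decide_eq_true (by omega)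
      simp only [hd, Bool.true_and, Bool.not_false, Bool.false_and, Bool.false_or]

-- ===== VERDICT (by name: the statement is the Claim_ definition above) =====
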